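-- pv_equiv track=rewrite | github.com/aehogan/adventofcode_2022 | 16/script_1.py | get_pressure_for_path
-- ===== SOURCE A (Python) =====
-- def get_pressure_for_path(path):
--
--     minute = 1
--     max_minutes = 30
--     pressure = 0
--     pressure_per_minute = 0
--
--     for connection, cost, flow_rate in path:
--         for time_counter in range(cost):
--             if minute > max_minutes:
--                 break
--
--             minute += 1
--             pressure += pressure_per_minute
--
--         if minute > max_minutes:
--             break
--
--         minute += 1
--         pressure += pressure_per_minute
--         pressure_per_minute += flow_rate
--
--     while minute <= max_minutes:
--         minute += 1
--         pressure += pressure_per_minute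
--
--     return pressure
-- ===== SOURCE B (Python) =====
-- def get_pressure_for_path(path):
--     elapsed = 0
--     ppm = 0
--     pressure = 0
--     for _, cost, flow_rate in path:
--         travel = max(0, min(cost, 30 - elapsed))
--         pressure += ppm * travel
--         elapsed += travel
--         if elapsed >= 30:
--             break
--         pressure += ppm
--         elapsed += 1
--         ppm += flow_rate
--     return pressure + ppm * (30 - elapsed)
-- ===== Notes on version B (the rewrite author's own statement) =====
-- stated objective: simpler
-- what changed: Replaces A's minute-by-minute simulation (inner range(cost) loop plus trailing while loop) with per-segment arithmetic: each travel leg and the idle tail are accounted in O(1) via ppm*duration.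
import Mathlib
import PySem

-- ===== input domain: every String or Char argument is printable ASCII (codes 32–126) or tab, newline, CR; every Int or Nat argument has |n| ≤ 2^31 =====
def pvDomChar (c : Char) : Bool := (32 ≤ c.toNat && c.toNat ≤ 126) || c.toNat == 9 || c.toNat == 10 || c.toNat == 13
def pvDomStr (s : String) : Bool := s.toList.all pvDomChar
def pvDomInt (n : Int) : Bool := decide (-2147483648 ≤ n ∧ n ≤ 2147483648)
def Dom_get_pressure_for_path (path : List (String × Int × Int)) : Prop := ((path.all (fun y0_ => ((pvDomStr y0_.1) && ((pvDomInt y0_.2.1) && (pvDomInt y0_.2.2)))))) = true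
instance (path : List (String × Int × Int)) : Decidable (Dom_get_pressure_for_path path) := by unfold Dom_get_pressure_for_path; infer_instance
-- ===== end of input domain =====

-- B replaces A's minute-by-minute simulation with O(1) per-segment arithmetic (simpler; same measured cost).

-- ===== PORT A =====
-- inner `for time_counter in range(cost)` loop of A: ticks one minute at a time, break once minute > 30
def pvInnerA (ppm : Int) : Nat → Int → Int → Int × Int
  | 0, m, p => (m, p)
  | k+1, m, p => if m > 30 then (m, p) else pvInnerA ppm k (m+1) (p+ppm)

-- trailing `while minute <= max_minutes` loop of A
def pvWhileA (ppm m p : Int) : Int :=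
  if m ≤ 30 then pvWhileA ppm (m+1) (p+ppm) else p
termination_by (31 - m).toNat
decreasing_by omega

-- A's outer `for connection, cost, flow_rate in path` loop
def pvGoA : List (String × Int × Int) → Int → Int → Int → Int
  | [], m, p, ppm => pvWhileA ppm m p
  | (_, c, f) :: t, m, p, ppm =>
      let r := pvInnerA ppm c.toNat m p
      if r.1 > 30 then pvWhileA ppm r.1 r.2
      else pvGoA t (r.1 + 1) (r.2 + ppm) (ppm + f)

def get_pressure_for_path (path : List (String × Int × Int)) : Int :=
  pvGoA path 1 0 0

-- ===== PORT B =====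
def pvAltGo : List (String × Int × Int) → Int → Int → Int → Int
  | [], e, ppm, pr => pr + ppm * (30 - e)
  | (_, c, f) :: t, e, ppm, pr =>
      let tr := max 0 (min c (30 - e))
      let pr' := pr + ppm * tr
      let e' := e + tr
      if e' ≥ 30 then pr' + ppm * (30 - e')
      else pvAltGo t (e' + 1) (ppm + f) (pr' + ppm)

def get_pressure_for_path_alt (path : List (String × Int × Int)) : Int :=
  pvAltGo path 0 0 0

-- ===== PRECONDITION & SPEC =====
def Spec_get_pressure_for_path (path : List (String × Int × Int)) (out : Int) : Prop := out = get_pressure_for_path_alt path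
instance (path : List (String × Int × Int)) (out : Int) : Decidable (Spec_get_pressure_for_path path out) := by unfold Spec_get_pressure_for_path; infer_instance

-- ===== CLAIM (what is proved, stated in full; the proofs are below) =====
def Claim_equal_get_pressure_for_path : Prop := ∀ (path : List (String × Int × Int)), Dom_get_pressure_for_path path → Spec_get_pressure_for_path path (get_pressure_for_path path)

-- ===== LEMMAS AND PROOFS =====

theorem pvWhileA_eq (ppm : Int) : ∀ m p, pvWhileA ppm m p = p + ppm * max 0 (31 - m) := by
  intro m p
  generalize hn : (31 - m).toNat = n
  induction n generalizing m p with
  | zero =>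
      rw [pvWhileA]
      have h : ¬ m ≤ 30 := by omega
      rw [if_neg h]
      have : max (0:Int) (31 - m) = 0 := by omega
      rw [this, mul_zero, add_zero]
  | succ n ih =>
      rw [pvWhileA]
      by_cases h : m ≤ 30
      · rw [if_pos h, ih (m+1) (p+ppm) (by omega)]
        have h1 : max (0:Int) (31 - (m+1)) = 30 - m := by omega
        have h2 : max (0:Int) (31 - m) = 31 - m := by omega
        rw [h1, h2]; ring
      · rw [if_neg h]
        have : max (0:Int) (31 - m) = 0 := by omega
        rw [this, mul_zero, add_zero]

theorem pvInnerA_eq (ppm : Int) : ∀ (k : Nat) (m p : Int), m ≤ 31 →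
    pvInnerA ppm k m p = (m + min (k : Int) (31 - m), p + ppm * min (k : Int) (31 - m)) := by
  intro k
  induction k with
  | zero =>
      intro m p hm
      have h0 : min (((0:Nat)):Int) (31 - m) = 0 := by push_cast; omega
      rw [pvInnerA, h0, mul_zero, add_zero, add_zero]
  | succ k ih =>
      intro m p hm
      rw [pvInnerA]
      by_cases h : m > 30
      · have h0 : min (((k+1:Nat)):Int) (31 - m) = 0 := by push_cast; omega
        rw [if_pos h, h0, mul_zero, add_zero, add_zero]
      · rw [if_neg h, ih (m+1) (p+ppm) (by omega), Prod.mk.injEq]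
        have h1 : min ((k : Int)) (31 - (m+1)) + 1 = min (((k+1 : Nat)) : Int) (31 - m) := by
          push_cast; omega
        refine ⟨by omega, ?_⟩
        rw [← h1]; ring

theorem pvGo_eq : ∀ (path : List (String × Int × Int)) (m p ppm : Int), 1 ≤ m → m ≤ 31 →
    pvGoA path m p ppm = pvAltGo path (m - 1) ppm p := by
  intro path
  induction path with
  | nil =>
      intro m p ppm h1 h2
      rw [pvGoA, pvAltGo, pvWhileA_eq]
      have : max (0:Int) (31 - m) = 30 - (m - 1) := by omega
      rw [this]
  | cons hd t ih =>
      obtain ⟨s, c, f⟩ := hd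
      intro m p ppm h1 h2
      rw [pvGoA, pvAltGo]
      rw [pvInnerA_eq ppm c.toNat m p h2]
      simp only
      have htr : max 0 (min c (30 - (m - 1))) = min ((c.toNat : Int)) (31 - m) := by omega
      set t31 := min ((c.toNat : Int)) (31 - m) with ht
      have ht0 : 0 ≤ t31 := by omega
      have ht31 : m + t31 ≤ 31 := by omega
      rw [htr]
      by_cases hb : m + t31 > 30
      · have hb' : (m - 1) + t31 ≥ 30 := by omega
        simp only [hb, if_pos, hb', if_pos]
        rw [pvWhileA_eq]
        have hmax : max (0:Int) (31 - (m + t31)) = 0 := by omega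
        have h30 : (30 : Int) - ((m - 1) + t31) = 0 := by omega
        rw [hmax, h30]
      · have hb' : ¬ ((m - 1) + t31 ≥ 30) := by omega
        simp only [hb, hb', if_false]
        rw [ih (m + t31 + 1) (p + ppm * t31 + ppm) (ppm + f) (by omega) (by omega)]
        have : m + t31 + 1 - 1 = (m - 1) + t31 + 1 := by omega
        rw [this]

-- ===== VERDICT (by name: the statement is the Claim_ definition above) =====
theorem get_pressure_for_path_spec : Claim_equal_get_pressure_for_path := by
  intro path _
  unfold Spec_get_pressure_for_path get_pressure_for_path get_pressure_for_path_alt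
  have := pvGo_eq path 1 0 0 (by omega) (by omega)
  simpa using this
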